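-- pv_equiv track=rewrite | github.com/ozkayas/leetcode_solutions | 9999-A2Z-OA/Amazon Review Score.py | findReviewScore
-- ===== SOURCE A (Python) =====
-- from typing import List
--
-- power = 31
--
-- MOD = 109001  # prime num
--
-- def hashFun(s:str) -> int:
--     N = len(s)
--     h = 0
--     for i in range(N):
--         digitValue = (ord(s[i]) * pow(power, N - i - 1, MOD)) % MOD
--         h += digitValue
--     return h % MOD
--
-- def rollHash(b: str, e: str, n: int, curHash: int) -> int:
--     toRemoveValue = (ord(b) * pow(power, n - 1, MOD)) % MOD
--     curHash = (curHash - toRemoveValue + MOD) % MOD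
--     curHash = (curHash * power) % MOD
--     curHash = (curHash + ord(e) * pow(power, 0, MOD)) % MOD
--
--     return curHash % MOD
--
-- def findMaxSubarray(review: str, found: List) -> int:
--     maxSub = 0
--     starts = [0] + sorted([s for s, e in found])
--     ends = sorted([e for s, e in found]) + [len(review)]
--
--     for i in range(len(starts)):
--         maxSub = max(maxSub, ends[i] - starts[i] - 1)
--
--     return maxSub
--
-- def findReviewScore(review: str, prohibitedWords: List[str]) -> int:
--     review = review.lower()
--     # Holds starting indexes of prohibitedWord in review
--     found = []
--
--     for word in prohibitedWords:
--         targetHash = hashFun(word)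
--         curHash = 0
--
--         # search for word in review, in chunks of len(word)
--         l, r = 0, len(word)
--         while r < len(review):
--             if l == 0:
--                 curHash = hashFun(review[l:r])
--             else:
--                 curHash = rollHash(review[l - 1], review[r - 1], len(word), curHash)
--
--             # This prohibited word is found in review in the range [l, r)
--             if curHash == targetHash:
--                 found.append((l, r - 1))
--
--             l += 1
--             r += 1
--
--     # Check for the longest substring
--     return findMaxSubarray(review, found)
-- ===== SOURCE B (Python) =====
-- from typing import List
--
-- power = 31
--
-- MOD = 109001  # prime num
--
--
-- def findMaxSubarray(review: str, found: List) -> int: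
--     starts = [0] + sorted(s for s, e in found)
--     ends = sorted(e for s, e in found) + [len(review)]
--     maxSub = 0
--     for s, e in zip(starts, ends):
--         maxSub = max(maxSub, e - s - 1)
--     return maxSub
--
--
-- def findReviewScore(review: str, prohibitedWords: List[str]) -> int:
--     review = review.lower()
--     n = len(review)
--
--     # One pass: prefix hashes H[i] = hash(review[:i]) and powers P[i] = power**i (mod MOD).
--     H = [0]
--     P = [1]
--     for ch in review:
--         H.append((H[-1] * power + ord(ch)) % MOD)
--         P.append((P[-1] * power) % MOD)
--
--     found = []
--     for word in prohibitedWords: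
--         m = len(word)
--         target = 0
--         for c in word:
--             target = (target * power + ord(c)) % MOD
--         # windows [l, l+m) with l+m < n, hash in O(1) from the prefix table
--         for l in range(n - m):
--             if (H[l + m] - H[l] * P[m]) % MOD == target:
--                 found.append((l, l + m - 1))
--
--     return findMaxSubarray(review, found)
-- ===== Notes on version B (the rewrite author's own statement) =====
-- stated objective: faster
-- what changed: Replaces the per-word incremental rolling-hash maintenance (an initial hashFun plus a rollHash with a modular pow call at every window step) by prefix-hash and power tables built in one pass over the review, from which each window hash is read in O(1); the max-gap scan folds over zip(starts, ends) instead of indexing.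
import Mathlib
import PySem

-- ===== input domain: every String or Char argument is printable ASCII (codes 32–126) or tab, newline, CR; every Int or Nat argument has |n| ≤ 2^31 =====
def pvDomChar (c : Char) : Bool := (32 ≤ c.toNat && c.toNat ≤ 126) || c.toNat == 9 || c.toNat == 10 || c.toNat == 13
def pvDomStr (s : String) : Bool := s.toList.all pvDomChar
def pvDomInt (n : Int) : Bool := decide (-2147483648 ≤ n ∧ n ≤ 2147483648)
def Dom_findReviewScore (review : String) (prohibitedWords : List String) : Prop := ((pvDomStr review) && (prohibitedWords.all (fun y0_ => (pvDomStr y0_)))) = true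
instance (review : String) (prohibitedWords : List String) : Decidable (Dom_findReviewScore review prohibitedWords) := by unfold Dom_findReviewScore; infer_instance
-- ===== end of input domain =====

-- B replaces A's per-word incremental rolling-hash maintenance by a prefix-hash/power
-- table built in one pass, with each window hash read off in O(1); same results.

-- ===== PORT A =====

def pvOrd (c : Char) : Int := (c.toNat : Int)

-- pow(31, e, 109001); for e < 0 Python uses the modular inverse of 31 mod the prime
-- 109001, which is 21097 (31 * 21097 % 109001 = 1): exact for this port's calls.
def pvPow31 (e : Int) : Int :=
  if e < 0 then PySem.Int.powMod 21097 (-e).toNat 109001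
  else PySem.Int.powMod 31 e.toNat 109001

-- hashFun; s[i] is in range for i < len(s), so getD is exact; Python % with the
-- positive literal modulus 109001 is Int.emod throughout this file.
def hashFunA (s : List Char) : Int :=
  ((List.range s.length).foldl
    (fun h i => h + (pvOrd (s.getD i ' ') * pvPow31 ((s.length : Int) - i - 1)) % 109001) 0) % 109001

-- rollHash
def rollHashA (b e : Char) (n : Int) (curHash : Int) : Int :=
  let toRemoveValue := (pvOrd b * pvPow31 (n - 1)) % 109001
  let c1 := (curHash - toRemoveValue + 109001) % 109001
  let c2 := (c1 * 31) % 109001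
  let c3 := (c2 + pvOrd e * pvPow31 0) % 109001
  c3 % 109001

-- the while-loop of findReviewScore; review[l-1] / review[r-1] are only read with
-- l ≥ 1 (hence r ≥ 1), in range, so getD is exact
def loopA (rl : List Char) (m : Nat) (t : Int) (l r : Nat) (curHash : Int)
    (found : List (Int × Int)) : List (Int × Int) :=
  if h : r < rl.length then
    let ch := if l = 0 then hashFunA (PySem.List.slice rl (some (l : Int)) (some (r : Int)))
              else rollHashA (rl.getD (l - 1) ' ') (rl.getD (r - 1) ' ') (m : Int) curHash
    let fnd := if ch = t then found ++ [((l : Int), (r : Int) - 1)] else found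
    loopA rl m t (l + 1) (r + 1) ch fnd
  else found
termination_by rl.length - r

-- findMaxSubarray; starts and ends have equal length, so the indexing is in range
-- and getD is exact
def findMaxSubarrayA (rl : List Char) (found : List (Int × Int)) : Int :=
  let starts : List Int := 0 :: PySem.List.sorted (found.map (fun p => p.1)) (fun x => x)
  let ends : List Int := PySem.List.sorted (found.map (fun p => p.2)) (fun x => x) ++ [(rl.length : Int)]
  (List.range starts.length).foldl (fun maxSub i => max maxSub (ends.getD i 0 - starts.getD i 0 - 1)) 0

def findReviewScore (review : String) (prohibitedWords : List String) : Int :=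
  let rl := PySem.Chars.lower review.toList
  let found := prohibitedWords.foldl
    (fun found word =>
      let w := word.toList
      loopA rl w.length (hashFunA w) 0 w.length 0 found) []
  findMaxSubarrayA rl found

-- ===== PORT B =====

-- Source B's findMaxSubarray: max over zip(starts, ends)
def findMaxSubarrayB (rl : List Char) (found : List (Int × Int)) : Int :=
  let starts : List Int := 0 :: PySem.List.sorted (found.map (fun p => p.1)) (fun x => x)
  let ends : List Int := PySem.List.sorted (found.map (fun p => p.2)) (fun x => x) ++ [(rl.length : Int)]
  (starts.zip ends).foldl (fun maxSub p => max maxSub (p.2 - p.1 - 1)) 0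

def findReviewScore_alt (review : String) (prohibitedWords : List String) : Int :=
  let rl := PySem.Chars.lower review.toList
  let n := rl.length
  -- Source B's single append-loop building H and P is ported as two scanls (the same
  -- element lists in the same order); H/P indices are ≤ n, in range, getD exact
  let H := List.scanl (fun h c => (h * 31 + pvOrd c) % 109001) 0 rl
  let P := List.scanl (fun p (_ : Char) => (p * 31) % 109001) 1 rl
  let found := prohibitedWords.foldl
    (fun found word =>
      let w := word.toList
      let m := w.length
      let t := w.foldl (fun t c => (t * 31 + pvOrd c) % 109001) 0
      (List.range (n - m)).foldl
        (fun fnd l =>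
          if (H.getD (l + m) 0 - H.getD l 0 * P.getD m 0) % 109001 = t
          then fnd ++ [((l : Int), (l : Int) + (m : Int) - 1)] else fnd) found) []
  findMaxSubarrayB rl found

-- ===== PRECONDITION & SPEC =====
def Spec_findReviewScore (review : String) (prohibitedWords : List String) (out : Int) : Prop := out = findReviewScore_alt review prohibitedWords
instance (review : String) (prohibitedWords : List String) (out : Int) : Decidable (Spec_findReviewScore review prohibitedWords out) := by unfold Spec_findReviewScore; infer_instance

-- ===== CLAIM (what is proved, stated in full; the proofs are below) =====
def Claim_equal_findReviewScore : Prop := ∀ (review : String) (prohibitedWords : List String), Dom_findReviewScore review prohibitedWords → Spec_findReviewScore review prohibitedWords (findReviewScore review prohibitedWords)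

-- ===== LEMMAS AND PROOFS =====

-- the common mathematical content of both hashings: the un-reduced polynomial value
def pvPoly (s : List Char) : Int := s.foldl (fun h c => h * 31 + pvOrd c) 0

theorem pvModeq_mod (a : Int) : Int.ModEq 109001 (a % 109001) a :=
  Int.emod_emod_of_dvd a dvd_rfl

theorem pvPoly_from (s : List Char) : ∀ (init : Int),
    s.foldl (fun h c => h * 31 + pvOrd c) init = init * 31 ^ s.length + pvPoly s := by
  induction s with
  | nil => intro init; simp [pvPoly]
  | cons c t ih =>
    intro init
    have hc : pvPoly (c :: t) = pvOrd c * 31 ^ t.length + pvPoly t := by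
      rw [pvPoly, List.foldl_cons, ih]; ring
    rw [List.foldl_cons, ih, hc, List.length_cons]; ring

theorem pvPoly_cons (c : Char) (t : List Char) :
    pvPoly (c :: t) = pvOrd c * 31 ^ t.length + pvPoly t := by
  have := pvPoly_from t (0 * 31 + pvOrd c)
  simpa [pvPoly] using this

theorem pvPoly_append (x y : List Char) :
    pvPoly (x ++ y) = pvPoly x * 31 ^ y.length + pvPoly y := by
  rw [pvPoly, List.foldl_append]
  exact pvPoly_from y _

-- sums of pointwise-congruent terms are congruent
theorem pvSum_modeq {ι : Type} (l : List ι) (f g : ι → Int)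
    (h : ∀ x ∈ l, Int.ModEq 109001 (f x) (g x)) :
    Int.ModEq 109001 (l.map f).sum (l.map g).sum := by
  induction l with
  | nil => rfl
  | cons a t ih =>
    simp only [List.map_cons, List.sum_cons]
    exact (h a (by simp)).add (ih fun x hx => h x (by simp [hx]))

-- the exact (un-reduced) value of A's positional sum
theorem pvPureSum (s : List Char) :
    ((List.range s.length).map (fun i => pvOrd (s.getD i ' ') * 31 ^ (s.length - 1 - i))).sum
      = pvPoly s := by
  induction s with
  | nil => simp [pvPoly]
  | cons c t ih =>
    rw [List.length_cons, List.range_succ_eq_map]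
    simp only [List.map_cons, List.map_map, List.sum_cons, List.getD_cons_zero]
    have h2 : ((List.range t.length).map
        ((fun i => pvOrd ((c :: t).getD i ' ') * 31 ^ (t.length + 1 - 1 - i)) ∘ Nat.succ)).sum
        = ((List.range t.length).map (fun i => pvOrd (t.getD i ' ') * 31 ^ (t.length - 1 - i))).sum := by
      congr 1
      apply List.map_congr_left
      intro i hi
      simp only [Function.comp_apply, List.getD_cons_succ]
      congr 2
      simp at hi
      omega
    rw [h2, ih, pvPoly_cons]
    simp

theorem hashFunA_eq (s : List Char) : hashFunA s = pvPoly s % 109001 := by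
  rw [hashFunA, PySem.List.foldl_add]
  rw [zero_add]
  have key : Int.ModEq 109001
      (((List.range s.length).map
        (fun i => (pvOrd (s.getD i ' ') * pvPow31 ((s.length : Int) - i - 1)) % 109001)).sum)
      (((List.range s.length).map
        (fun i => pvOrd (s.getD i ' ') * 31 ^ (s.length - 1 - i))).sum) := by
    apply pvSum_modeq
    intro i hi
    simp only [List.mem_range] at hi
    have hp : pvPow31 ((s.length : Int) - i - 1) = (31 : Int) ^ (s.length - 1 - i) % 109001 := by
      rw [pvPow31, if_neg (by omega),
        PySem.Int.powMod_eq_emod 31 ((s.length : Int) - i - 1).toNat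
          (show (0:Int) < 109001 by norm_num)]
      have : ((s.length : Int) - i - 1).toNat = s.length - 1 - i := by omega
      rw [this]
    rw [hp]
    exact (pvModeq_mod _).trans ((pvModeq_mod _).mul_left _)
  rw [pvPureSum] at key
  exact key

-- B's Horner fold with reduction at every step
theorem pvHorner_fold (s : List Char) : ∀ (a : Int),
    s.foldl (fun t c => (t * 31 + pvOrd c) % 109001) (a % 109001)
      = (s.foldl (fun t c => t * 31 + pvOrd c) a) % 109001 := by
  induction s with
  | nil => intro a; rfl
  | cons c t ih =>
    intro a
    simp only [List.foldl_cons]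
    have h : (a % 109001 * 31 + pvOrd c) % 109001 = (a * 31 + pvOrd c) % 109001 :=
      ((pvModeq_mod a).mul_right 31).add_right (pvOrd c)
    rw [h, ← ih (a * 31 + pvOrd c)]

theorem pvPow_fold (s : List Char) : ∀ (e : Nat),
    s.foldl (fun p (_ : Char) => (p * 31) % 109001) ((31 ^ e : Int) % 109001)
      = (31 ^ (e + s.length) : Int) % 109001 := by
  induction s with
  | nil => intro e; simp
  | cons c t ih =>
    intro e
    simp only [List.foldl_cons]
    have h : ((31 ^ e : Int) % 109001 * 31) % 109001 = (31 ^ (e + 1) : Int) % 109001 := by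
      have := (pvModeq_mod ((31:Int) ^ e)).mul_right 31
      calc ((31 ^ e : Int) % 109001 * 31) % 109001 = ((31:Int) ^ e * 31) % 109001 := this
        _ = (31 ^ (e + 1) : Int) % 109001 := by rw [pow_succ]
    rw [h, ih (e + 1)]
    congr 1
    simp [List.length_cons]
    ring

theorem pvScanl_getD {α β : Type} (f : β → α → β) (d : β) :
    ∀ (xs : List α) (i : Nat) (b : β), i ≤ xs.length →
      (List.scanl f b xs).getD i d = (xs.take i).foldl f b := by
  intro xs
  induction xs with
  | nil => intro i b h; simp at h; subst h; simp
  | cons a t ih =>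
    intro i b h
    cases i with
    | zero => simp
    | succ j =>
      simp only [List.scanl_cons, List.getD_cons_succ, List.take_succ_cons, List.foldl_cons]
      exact ih j (f b a) (by simpa using h)

theorem pvH_getD (rl : List Char) (i : Nat) (hi : i ≤ rl.length) :
    (List.scanl (fun h c => (h * 31 + pvOrd c) % 109001) 0 rl).getD i 0
      = pvPoly (rl.take i) % 109001 := by
  rw [pvScanl_getD _ _ rl i 0 hi]
  have h0 : (0 : Int) = 0 % 109001 := by norm_num
  rw [h0, pvHorner_fold]
  rfl

theorem pvP_getD (rl : List Char) (m : Nat) (hm : m ≤ rl.length) :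
    (List.scanl (fun p (_ : Char) => (p * 31) % 109001) 1 rl).getD m 0
      = (31 ^ m : Int) % 109001 := by
  rw [pvScanl_getD _ _ rl m 1 hm]
  have h0 : (1 : Int) = (31 ^ 0 : Int) % 109001 := by norm_num
  rw [h0, pvPow_fold]
  have hl : (rl.take m).length = m := by rw [List.length_take]; omega
  rw [hl, Nat.zero_add]

-- B's O(1) window hash equals the polynomial hash of the window
theorem pvWindowB (rl : List Char) (l m : Nat) (h : l + m ≤ rl.length) :
    ((List.scanl (fun h c => (h * 31 + pvOrd c) % 109001) 0 rl).getD (l + m) 0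
      - (List.scanl (fun h c => (h * 31 + pvOrd c) % 109001) 0 rl).getD l 0
        * (List.scanl (fun p (_ : Char) => (p * 31) % 109001) 1 rl).getD m 0) % 109001
      = pvPoly ((rl.drop l).take m) % 109001 := by
  rw [pvH_getD rl (l + m) h, pvH_getD rl l (by omega), pvP_getD rl m (by omega)]
  have hsplit : rl.take (l + m) = rl.take l ++ (rl.drop l).take m := List.take_add
  have hlen : ((rl.drop l).take m).length = m := by
    rw [List.length_take, List.length_drop]; omega
  have hval : pvPoly (rl.take (l + m))
      = pvPoly (rl.take l) * 31 ^ m + pvPoly ((rl.drop l).take m) := by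
    rw [hsplit, pvPoly_append, hlen]
  show Int.ModEq 109001 _ _
  calc pvPoly (rl.take (l + m)) % 109001
        - pvPoly (rl.take l) % 109001 * ((31 ^ m : Int) % 109001)
      ≡ pvPoly (rl.take (l + m)) - pvPoly (rl.take l) * 31 ^ m [ZMOD 109001] :=
        (pvModeq_mod _).sub ((pvModeq_mod _).mul (pvModeq_mod _))
    _ = pvPoly ((rl.drop l).take m) := by rw [hval]; ring

-- A's rolling-hash step moves the window hash one position to the right
theorem pvRoll (rl : List Char) (m l : Nat) (h1 : 1 ≤ l) (h2 : l + m < rl.length) :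
    rollHashA (rl.getD (l - 1) ' ') (rl.getD (l + m - 1) ' ') (m : Int)
        (pvPoly ((rl.drop (l - 1)).take m) % 109001)
      = pvPoly ((rl.drop l).take m) % 109001 := by
  cases m with
  | zero =>
    simp only [Nat.add_zero, Nat.cast_zero, List.take_zero]
    set b : Int := pvOrd (rl.getD (l - 1) ' ') with hb
    have hP : pvPoly ([] : List Char) = 0 := rfl
    rw [hP]
    simp only [rollHashA]
    have e1 : pvPow31 ((0 : Int) - 1) = 21097 := by decide
    have e2 : pvPow31 0 = 1 := by decide
    rw [e1, e2]
    have hzero : (0 : Int) % 109001 = 0 := by norm_num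
    rw [hzero]
    have hX : Int.ModEq 109001
        ((((0 - (b * 21097) % 109001 + 109001) % 109001) * 31) % 109001 + b * 1) 0 := by
      calc (((0 - (b * 21097) % 109001 + 109001) % 109001) * 31) % 109001 + b * 1
          ≡ ((0 - (b * 21097) % 109001 + 109001) % 109001) * 31 + b * 1 [ZMOD 109001] :=
            (pvModeq_mod _).add_right _
        _ ≡ (0 - (b * 21097) % 109001 + 109001) * 31 + b * 1 [ZMOD 109001] :=
            ((pvModeq_mod _).mul_right 31).add_right _
        _ ≡ (0 - b * 21097 + 109001) * 31 + b * 1 [ZMOD 109001] :=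
            ((((Int.ModEq.refl 0).sub (pvModeq_mod _)).add_right 109001).mul_right 31).add_right _
        _ ≡ 0 [ZMOD 109001] := Int.ModEq.symm (Int.modEq_iff_dvd.mpr ⟨31 - 6 * b, by ring⟩)
    calc ((((0 - (b * 21097) % 109001 + 109001) % 109001) * 31) % 109001 + b * 1) % 109001 % 109001
        = (((((0 - (b * 21097) % 109001 + 109001) % 109001) * 31) % 109001 + b * 1)) % 109001 :=
          Int.emod_emod_of_dvd _ dvd_rfl
      _ = 0 := by rw [hX]; norm_num
  | succ k =>
    have hl1 : l - 1 < rl.length := by omega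
    have hlk : l + k < rl.length := by omega
    set b : Char := rl.getD (l - 1) ' ' with hbdef
    set e : Char := rl.getD (l + (k + 1) - 1) ' ' with hedef
    set mid : List Char := (rl.drop l).take k with hmid
    have hmidlen : mid.length = k := by
      rw [hmid, List.length_take, List.length_drop]; omega
    have F1 : (rl.drop (l - 1)).take (k + 1) = b :: mid := by
      have hb' : b = rl[l - 1]'hl1 := by rw [hbdef, List.getD_eq_getElem rl ' ' hl1]
      have hll : l - 1 + 1 = l := by omega
      have hd : rl.drop (l - 1) = rl[l - 1]'hl1 :: rl.drop l := by
        rw [List.drop_eq_getElem_cons hl1, hll]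
      rw [hd, List.take_succ_cons, hb', hmid]
    have F2 : (rl.drop l).take (k + 1) = mid ++ [e] := by
      have hklen : k < (rl.drop l).length := by rw [List.length_drop]; omega
      have he : e = rl[l + k]'(by omega) := by
        rw [hedef, List.getD_eq_getElem rl ' ' (by omega)]
        congr 1
      rw [List.take_add_one, hmid]
      congr 1
      rw [List.getElem?_eq_getElem hklen]
      simp only [Option.toList_some, List.getElem_drop, he]
    rw [F1, F2]
    simp only [rollHashA]
    have e1 : pvPow31 (((k + 1 : Nat) : Int) - 1) = (31 : Int) ^ k % 109001 := by
      rw [pvPow31, if_neg (by push_cast; omega)]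
      rw [PySem.Int.powMod_eq_emod 31 _ (show (0:Int) < 109001 by norm_num)]
      congr 2
      push_cast; omega
    have e2 : pvPow31 0 = 1 := by decide
    rw [e1, e2]
    have hcons : pvPoly (b :: mid) = pvOrd b * 31 ^ k + pvPoly mid := by
      rw [pvPoly_cons, hmidlen]
    have hsnoc : pvPoly (mid ++ [e]) = pvPoly mid * 31 + pvOrd e := by
      rw [pvPoly_append]
      have h1 : pvPoly [e] = pvOrd e := by simp [pvPoly]
      rw [h1, List.length_singleton, pow_one]
    show (((((pvPoly (b :: mid) % 109001 - (pvOrd b * ((31:Int) ^ k % 109001)) % 109001 + 109001) % 109001) * 31) % 109001 + pvOrd e * 1) % 109001) % 109001 = pvPoly (mid ++ [e]) % 109001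
    have hX : Int.ModEq 109001
        ((((pvPoly (b :: mid) % 109001 - (pvOrd b * ((31:Int) ^ k % 109001)) % 109001 + 109001) % 109001) * 31) % 109001 + pvOrd e * 1)
        (pvPoly (mid ++ [e])) := by
      calc (((pvPoly (b :: mid) % 109001 - (pvOrd b * ((31:Int) ^ k % 109001)) % 109001 + 109001) % 109001) * 31) % 109001 + pvOrd e * 1
          ≡ (((pvPoly (b :: mid) % 109001 - (pvOrd b * ((31:Int) ^ k % 109001)) % 109001 + 109001) % 109001) * 31) + pvOrd e * 1 [ZMOD 109001] :=
            (pvModeq_mod _).add_right _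
        _ ≡ ((pvPoly (b :: mid) % 109001 - (pvOrd b * ((31:Int) ^ k % 109001)) % 109001 + 109001)) * 31 + pvOrd e * 1 [ZMOD 109001] :=
            ((pvModeq_mod _).mul_right 31).add_right _
        _ ≡ (pvPoly (b :: mid) - pvOrd b * (31:Int) ^ k + 109001) * 31 + pvOrd e * 1 [ZMOD 109001] := by
            refine (((Int.ModEq.sub ?_ ?_).add_right 109001).mul_right 31).add_right _
            · exact pvModeq_mod _
            · exact (pvModeq_mod _).trans ((pvModeq_mod _).mul_left _)
        _ ≡ pvPoly (mid ++ [e]) [ZMOD 109001] := by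
            rw [hcons, hsnoc]
            exact Int.ModEq.symm (Int.modEq_iff_dvd.mpr ⟨31, by ring⟩)
    calc ((((pvPoly (b :: mid) % 109001 - (pvOrd b * ((31:Int) ^ k % 109001)) % 109001 + 109001) % 109001) * 31) % 109001 + pvOrd e * 1) % 109001 % 109001
        = ((((pvPoly (b :: mid) % 109001 - (pvOrd b * ((31:Int) ^ k % 109001)) % 109001 + 109001) % 109001) * 31) % 109001 + pvOrd e * 1) % 109001 :=
          Int.emod_emod_of_dvd _ dvd_rfl
      _ = pvPoly (mid ++ [e]) % 109001 := hX

-- A's while loop appends exactly the matching window starts, in increasing order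
theorem loopA_eq (rl : List Char) (m : Nat) (t : Int) :
    ∀ (fuel l : Nat) (ch : Int) (found : List (Int × Int)),
      rl.length - (l + m) ≤ fuel →
      (1 ≤ l → ch = pvPoly ((rl.drop (l - 1)).take m) % 109001) →
      loopA rl m t l (l + m) ch found
        = found ++ ((List.range' l (rl.length - m - l)).filter
            (fun j => decide (pvPoly ((rl.drop j).take m) % 109001 = t))).map
            (fun (j : Nat) => ((j : Int), (j : Int) + (m : Int) - 1)) := by
  intro fuel
  induction fuel with
  | zero =>
    intro l ch found hf hinv
    rw [loopA, dif_neg (by omega)]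
    have h0 : rl.length - m - l = 0 := by omega
    rw [h0]
    simp
  | succ f ih =>
    intro l ch found hf hinv
    rw [loopA]
    by_cases h : l + m < rl.length
    · rw [dif_pos h]
      have heff : (if l = 0 then
            hashFunA (PySem.List.slice rl (some (l : Int)) (some ((l + m : Nat) : Int)))
          else rollHashA (rl.getD (l - 1) ' ') (rl.getD (l + m - 1) ' ') (m : Int) ch)
          = pvPoly ((rl.drop l).take m) % 109001 := by
        by_cases hl : l = 0
        · subst hl
          rw [if_pos rfl, PySem.List.slice_natCast, hashFunA_eq]
          have : 0 + m - 0 = m := by omega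
          rw [this]
        · rw [if_neg hl]
          rw [hinv (by omega)]
          exact pvRoll rl m l (by omega) h
      rw [heff]
      have hcount : rl.length - m - l = (rl.length - m - (l + 1)) + 1 := by omega
      rw [hcount, List.range'_succ]
      have hr : l + m + 1 = (l + 1) + m := by omega
      rw [hr]
      have hih := fun fnd => ih (l + 1) (pvPoly ((rl.drop l).take m) % 109001) fnd
          (by omega) (fun _ => by rw [Nat.add_sub_cancel])
      rw [hih]
      by_cases hc : pvPoly ((rl.drop l).take m) % 109001 = t
      · have hcast : ((l + m : Nat) : Int) - 1 = (l : Int) + (m : Int) - 1 := by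
          push_cast; ring
        rw [if_pos hc, List.filter_cons_of_pos (by simpa using hc), List.map_cons,
          List.append_cons, hcast]
        simp
      · rw [if_neg hc, List.filter_cons_of_neg (by simpa using hc)]
    · rw [dif_neg h]
      have h0 : rl.length - m - l = 0 := by omega
      rw [h0]
      simp

-- index-fold = zip-fold for equal-length lists
theorem pvZipFold : ∀ (xs ys : List Int) (a : Int), xs.length = ys.length →
    (List.range xs.length).foldl (fun m i => max m (ys.getD i 0 - xs.getD i 0 - 1)) a
      = (xs.zip ys).foldl (fun m p => max m (p.2 - p.1 - 1)) a := by
  intro xs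
  induction xs with
  | nil =>
    intro ys a h
    cases ys with
    | nil => simp
    | cons y ys' => simp at h
  | cons x xs' ih =>
    intro ys a h
    cases ys with
    | nil => simp at h
    | cons y ys' =>
      simp only [List.length_cons] at h
      rw [List.length_cons, List.range_succ_eq_map]
      simp only [List.foldl_cons, List.foldl_map, List.zip_cons_cons,
        List.getD_cons_zero, List.getD_cons_succ]
      exact ih ys' _ (by omega)

theorem pvMaxSub_eq (rl : List Char) (found : List (Int × Int)) :
    findMaxSubarrayA rl found = findMaxSubarrayB rl found := by
  rw [findMaxSubarrayA, findMaxSubarrayB]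
  apply pvZipFold
  simp [PySem.List.length_sorted]

-- extensionally equal step functions give equal folds
theorem pvFoldl_ext {α β : Type} (f g : α → β → α) (h : ∀ a b, f a b = g a b) :
    ∀ (l : List β) (a : α), l.foldl f a = l.foldl g a := by
  intro l
  induction l with
  | nil => intro a; rfl
  | cons x t ih => intro a; rw [List.foldl_cons, List.foldl_cons, h a x]; exact ih _

-- ===== VERDICT (by name: the statement is the Claim_ definition above) =====
theorem findReviewScore_spec : Claim_equal_findReviewScore := by
  unfold Claim_equal_findReviewScore
  intro review prohibitedWords _
  unfold Spec_findReviewScore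
  simp only [findReviewScore, findReviewScore_alt]
  rw [pvMaxSub_eq]
  congr 1
  apply pvFoldl_ext
  intro acc word
  have hA := loopA_eq (PySem.Chars.lower review.toList) word.toList.length
      (hashFunA word.toList) (PySem.Chars.lower review.toList).length 0 0 acc
      (by omega) (fun h => absurd h (by omega))
  rw [Nat.zero_add] at hA
  rw [Nat.sub_zero] at hA
  rw [hA]
  have htB : word.toList.foldl (fun t c => (t * 31 + pvOrd c) % 109001) 0
      = pvPoly word.toList % 109001 := by
    have h0 : (0 : Int) = 0 % 109001 := by norm_num
    rw [h0, pvHorner_fold]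
    rfl
  have hB := PySem.List.foldl_append_if
      (fun j : Nat => decide
        (((List.scanl (fun h c => (h * 31 + pvOrd c) % 109001) 0 (PySem.Chars.lower review.toList)).getD (j + word.toList.length) 0
          - (List.scanl (fun h c => (h * 31 + pvOrd c) % 109001) 0 (PySem.Chars.lower review.toList)).getD j 0
            * (List.scanl (fun p (_ : Char) => (p * 31) % 109001) 1 (PySem.Chars.lower review.toList)).getD word.toList.length 0) % 109001
          = word.toList.foldl (fun t c => (t * 31 + pvOrd c) % 109001) 0))
      (fun j : Nat => ((j : Int), (j : Int) + (word.toList.length : Int) - 1))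
      (List.range ((PySem.Chars.lower review.toList).length - word.toList.length)) acc
  simp only [decide_eq_true_eq] at hB
  rw [hB, ← List.range_eq_range']
  congr 1
  congr 1
  apply List.filter_congr
  intro j hj
  simp only [List.mem_range] at hj
  rw [pvWindowB (PySem.Chars.lower review.toList) j word.toList.length (by omega),
    htB, hashFunA_eq]
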